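-- pv_equiv track=rewrite | github.com/stevenkozeniesky02/shellsense | src/shellsense/core/parser.py | _strip_redirect
-- ===== SOURCE A (Python) =====
-- def _strip_redirect(text: str) -> str:
--     """Remove redirect portion from command string."""
--     in_single = False
--     in_double = False
--
--     for i, c in enumerate(text):
--         if c == "'" and not in_double:
--             in_single = not in_single
--         elif c == '"' and not in_single:
--             in_double = not in_double
--         elif c in (">",) and not in_single and not in_double:
--             return text[:i].rstrip()
--
--     return text
-- ===== SOURCE B (Python) =====
-- def _strip_redirect(text: str) -> str:
--     """Remove redirect portion from command string."""
--     i = 0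
--     n = len(text)
--     while i < n:
--         c = text[i]
--         if c == "'" or c == '"':
--             j = text.find(c, i + 1)
--             if j == -1:
--                 return text  # unterminated quote swallows the rest
--             i = j + 1
--         elif c == '>':
--             return text[:i].rstrip()
--         else:
--             i += 1
--     return text
-- ===== Notes on version B (the rewrite author's own statement) =====
-- stated objective: alternative
-- what changed: Replaces A's per-character scan with two quote-state booleans by an index-jumping scan that, at each opening quote, finds the matching quote and skips the whole quoted span at once, returning the full text on an unterminated quote.
import Mathlib
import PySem

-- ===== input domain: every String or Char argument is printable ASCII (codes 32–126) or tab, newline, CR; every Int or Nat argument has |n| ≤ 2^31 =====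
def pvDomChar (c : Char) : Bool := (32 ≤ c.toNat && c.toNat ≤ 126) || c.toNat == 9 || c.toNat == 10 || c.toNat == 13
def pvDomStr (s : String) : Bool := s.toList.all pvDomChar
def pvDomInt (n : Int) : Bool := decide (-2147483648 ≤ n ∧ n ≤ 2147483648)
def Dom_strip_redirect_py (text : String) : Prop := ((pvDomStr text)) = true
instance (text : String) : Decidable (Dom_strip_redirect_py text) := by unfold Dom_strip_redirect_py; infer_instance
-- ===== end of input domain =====

-- B replaces A's per-character quote-state booleans by an index-jumping scan that skips
-- each whole quoted span with one find; objective: simpler (same O(n) cost, return value only).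

-- ===== PORT A =====
-- loop over (i, c) with the two quote flags; early return text[:i].rstrip()
def stripA (full : List Char) : List Char → Nat → Bool → Bool → List Char
  | [], _, _, _ => full
  | c :: rest, i, inS, inD =>
    if c = '\'' ∧ inD = false then stripA full rest (i+1) (!inS) inD
    else if c = '"' ∧ inS = false then stripA full rest (i+1) inS (!inD)
    else if c = '>' ∧ inS = false ∧ inD = false then PySem.Chars.rstrip (full.take i)
    else stripA full rest (i+1) inS inD

def strip_redirect_py (text : String) : String :=
  String.ofList (stripA text.toList text.toList 0 false false)

-- ===== PORT B =====
-- index-jumping scan: at a quote, find the matching quote in the rest and skip past the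
-- whole span (text.find(c, i+1) ported as findIdx? on the remaining characters);
-- an unterminated quote returns the full text; an unquoted '>' returns text[:i].rstrip()
def stripB (full : List Char) : List Char → Nat → List Char
  | [], _ => full
  | c :: rest, i =>
    if c = '\'' ∨ c = '"' then
      match h : rest.findIdx? (· = c) with
      | none => full
      | some j => stripB full (rest.drop (j+1)) (i + 1 + (j+1))
    else if c = '>' then PySem.Chars.rstrip (full.take i)
    else stripB full rest (i+1)
termination_by cs => cs.length
decreasing_by
  · simp only [List.length_cons, List.length_drop]; omega
  · simp

def strip_redirect_py_alt (text : String) : String :=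
  String.ofList (stripB text.toList text.toList 0)

-- ===== PRECONDITION & SPEC =====
def Spec_strip_redirect_py (text : String) (out : String) : Prop := out = strip_redirect_py_alt text
instance (text : String) (out : String) : Decidable (Spec_strip_redirect_py text out) := by unfold Spec_strip_redirect_py; infer_instance

-- ===== CLAIM (what is proved, stated in full; the proofs are below) =====
def Claim_equal_strip_redirect_py : Prop := ∀ (text : String), Dom_strip_redirect_py text → Spec_strip_redirect_py text (strip_redirect_py text)

-- ===== LEMMAS AND PROOFS =====

-- Inside a single-quoted span only the closing ' matters: A's scan with in_single = true
-- is exactly "find the next ' and resume in neutral state after it (or run off the end)".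
theorem stripA_single (full : List Char) (rest : List Char) (k : Nat) :
    stripA full rest k true false =
      (match rest.findIdx? (· = '\'') with
       | none => full
       | some j => stripA full (rest.drop (j+1)) (k + j + 1) false false) := by
  induction rest generalizing k with
  | nil => simp [stripA]
  | cons c cs ih =>
    by_cases hc : c = '\''
    · subst hc
      simp [stripA, List.findIdx?_cons]
    · rw [show stripA full (c :: cs) k true false = stripA full cs (k+1) true false by
        simp [stripA, hc]]
      rw [ih]
      rcases h : cs.findIdx? (· = '\'') with _ | j <;>
        simp [List.findIdx?_cons, hc, h]
      congr 1
      omega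

-- Same for a double-quoted span.
theorem stripA_double (full : List Char) (rest : List Char) (k : Nat) :
    stripA full rest k false true =
      (match rest.findIdx? (· = '"') with
       | none => full
       | some j => stripA full (rest.drop (j+1)) (k + j + 1) false false) := by
  induction rest generalizing k with
  | nil => simp [stripA]
  | cons c cs ih =>
    by_cases hc : c = '"'
    · subst hc
      simp [stripA, List.findIdx?_cons]
    · rw [show stripA full (c :: cs) k false true = stripA full cs (k+1) false true by
        simp [stripA, hc]]
      rw [ih]
      rcases h : cs.findIdx? (· = '"') with _ | j <;>
        simp [List.findIdx?_cons, hc, h]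
      congr 1
      omega

-- In neutral state the two scans agree (induction on a length bound, since B jumps ahead).
theorem stripAB (full : List Char) : ∀ (n : Nat) (rest : List Char) (k : Nat),
    rest.length ≤ n → stripA full rest k false false = stripB full rest k := by
  intro n
  induction n with
  | zero =>
    intro rest k h
    have : rest = [] := List.eq_nil_of_length_eq_zero (Nat.le_zero.mp h)
    subst this
    simp [stripA, stripB]
  | succ n ih =>
    intro rest k h
    match rest with
    | [] => simp [stripA, stripB]
    | c :: cs =>
      by_cases hs : c = '\''
      · subst hs
        rw [show stripA full ('\'' :: cs) k false false
              = stripA full cs (k+1) true false by simp [stripA]]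
        rw [stripA_single, stripB]
        rcases cs.findIdx? (· = '\'') with _ | j
        · simp
        · simp only []
          have hd : (cs.drop (j+1)).length ≤ n := by
            have := List.length_drop (l := cs) (i := j+1)
            simp only [List.length_cons] at h
            omega
          rw [ih _ _ hd, if_pos (by simp)]
          congr 1
      · by_cases hd : c = '"'
        · subst hd
          rw [show stripA full ('"' :: cs) k false false
                = stripA full cs (k+1) false true by simp [stripA, hs]]
          rw [stripA_double, stripB]
          rcases cs.findIdx? (· = '"') with _ | j
          · simp
          · simp only []
            have hln : (cs.drop (j+1)).length ≤ n := by
              have := List.length_drop (l := cs) (i := j+1)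
              simp only [List.length_cons] at h
              omega
            rw [ih _ _ hln, if_pos (by simp)]
            congr 1
        · by_cases hg : c = '>'
          · subst hg
            rw [stripB]
            simp [stripA, hs, hd]
          · rw [stripB]
            simp only [List.length_cons] at h
            rw [show stripA full (c :: cs) k false false
                  = stripA full cs (k+1) false false by simp [stripA, hs, hd, hg]]
            rw [ih _ _ (by omega)]
            simp [hs, hd, hg]

-- ===== VERDICT (by name: the statement is the Claim_ definition above) =====
theorem strip_redirect_py_spec : Claim_equal_strip_redirect_py := by
  intro text _
  unfold Spec_strip_redirect_py strip_redirect_py strip_redirect_py_alt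
  rw [stripAB text.toList text.toList.length text.toList 0 le_rfl]
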